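-- pv_equiv track=rewrite | github.com/aniruddhgoteti/idiotypeforge | app/tools/mhcflurry_predict.py | slide_windows
-- ===== SOURCE A (Python) =====
-- def slide_windows(seq: str, lengths: list[int]) -> list[str]:
--     """All k-mers of the requested lengths, deduplicated, in order."""
--     seen: set[str] = set()
--     out: list[str] = []
--     for k in lengths:
--         for i in range(len(seq) - k + 1):
--             kmer = seq[i:i + k]
--             if kmer in seen:
--                 continue
--             # Skip kmers with non-canonical AAs (X, *, gaps)
--             if any(aa not in "ACDEFGHIKLMNPQRSTVWY" for aa in kmer):
--                 continue
--             seen.add(kmer)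
--             out.append(kmer)
--     return out
-- ===== SOURCE B (Python) =====
-- def slide_windows(seq: str, lengths: list[int]) -> list[str]:
--     """All k-mers of the requested lengths, deduplicated, in order."""
--     canon = set("ACDEFGHIKLMNPQRSTVWY")
--     # pre[j] = number of non-canonical residues among seq[:j]
--     pre = [0]
--     for ch in seq:
--         pre.append(pre[-1] + (ch not in canon))
--     seen: set[str] = set()
--     out: list[str] = []
--     n = len(seq)
--     for k in lengths:
--         for i in range(n - k + 1):
--             if pre[i + k] - pre[i]:
--                 continue  # window contains a non-canonical residue
--             kmer = seq[i:i + k]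
--             if kmer not in seen:
--                 seen.add(kmer)
--                 out.append(kmer)
--     return out
-- ===== Notes on version B (the rewrite author's own statement) =====
-- stated objective: alternative
-- what changed: B precomputes a prefix-count array of non-canonical residues once, replacing A's per-k-mer any() validity scan by an O(1) prefix-difference test pre[i+k]-pre[i]; Pre_ excludes negative window lengths, on which A's negative-slice wraparound returns accidental k-mers while B's prefix indexing raises IndexError.
-- outside the precondition, e.g. on slide_windows('A', [-1]): A returns [''], B raises IndexError; on slide_windows('ACD', [-1]): A returns ['AC', ''], B raises IndexError
import Mathlib
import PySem

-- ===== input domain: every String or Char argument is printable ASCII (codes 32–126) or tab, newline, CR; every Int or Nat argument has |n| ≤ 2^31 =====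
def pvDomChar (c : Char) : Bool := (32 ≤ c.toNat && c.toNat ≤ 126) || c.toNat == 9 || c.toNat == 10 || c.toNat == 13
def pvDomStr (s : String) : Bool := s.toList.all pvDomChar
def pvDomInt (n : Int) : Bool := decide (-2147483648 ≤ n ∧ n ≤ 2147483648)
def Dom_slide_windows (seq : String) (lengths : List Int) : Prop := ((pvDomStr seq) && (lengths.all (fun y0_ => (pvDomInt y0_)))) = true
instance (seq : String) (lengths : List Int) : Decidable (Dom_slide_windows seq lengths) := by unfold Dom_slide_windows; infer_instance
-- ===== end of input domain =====

-- B builds a prefix-count array of non-canonical residues once and tests each window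
-- by a prefix difference, replacing A's per-k-mer character scan (alternative decomposition).

-- ===== PORT A =====
def slide_windows (seq : String) (lengths : List Int) : List String :=
  (lengths.foldl (fun (st : PySem.Set String × List String) k =>
    (PySem.List.pyRange 0 (PySem.Str.len seq - k + 1)).foldl (fun st i =>
      let kmer := PySem.Str.slice seq (some i) (some (i + k))
      if PySem.Set.contains st.1 kmer then st
      else if kmer.toList.any (fun aa => !(PySem.Str.isIn (String.singleton aa) "ACDEFGHIKLMNPQRSTVWY")) then st
      else (PySem.Set.add st.1 kmer, st.2 ++ [kmer])) st)
    ((PySem.Set.empty : PySem.Set String), ([] : List String))).2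

-- ===== PORT B =====
-- pre[i + k] / pre[i] are in range for every index the loops reach when all k ≥ 0 (Pre_);
-- they are ported with pyGetD (exact wherever the Python B returns).
def slide_windows_alt (seq : String) (lengths : List Int) : List String :=
  let canon : PySem.Set Char := PySem.Set.ofList "ACDEFGHIKLMNPQRSTVWY".toList
  let pre := seq.toList.foldl (fun (pre : List Int) ch =>
      pre ++ [PySem.List.pyGetD pre (-1) 0 + (if !(PySem.Set.contains canon ch) then 1 else 0)])
    ([0] : List Int)
  (lengths.foldl (fun (st : PySem.Set String × List String) k =>
    (PySem.List.pyRange 0 (PySem.Str.len seq - k + 1)).foldl (fun st i =>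
      if PySem.List.pyGetD pre (i + k) 0 - PySem.List.pyGetD pre i 0 ≠ 0 then st
      else
        let kmer := PySem.Str.slice seq (some i) (some (i + k))
        if !(PySem.Set.contains st.1 kmer) then (PySem.Set.add st.1 kmer, st.2 ++ [kmer])
        else st) st)
    ((PySem.Set.empty : PySem.Set String), ([] : List String))).2

-- ===== PRECONDITION & SPEC =====
-- Pre_ excludes negative window lengths: there A's negative-stop slice wraps around and
-- returns accidental k-mers, while B's prefix-array indexing raises IndexError.
def Pre_slide_windows (seq : String) (lengths : List Int) : Prop := ∀ k ∈ lengths, 0 ≤ k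
instance (seq : String) (lengths : List Int) : Decidable (Pre_slide_windows seq lengths) := by unfold Pre_slide_windows; infer_instance

def pvWitness_slide_windows : String × List Int := ("ACXDW", [2, 3])

def Spec_slide_windows (seq : String) (lengths : List Int) (out : List String) : Prop := out = slide_windows_alt seq lengths
instance (seq : String) (lengths : List Int) (out : List String) : Decidable (Spec_slide_windows seq lengths out) := by unfold Spec_slide_windows; infer_instance

-- ===== CLAIM (what is proved, stated in full; the proofs are below) =====
def Claim_equal_slide_windows : Prop := ∀ (seq : String) (lengths : List Int), Dom_slide_windows seq lengths → Pre_slide_windows seq lengths → Spec_slide_windows seq lengths (slide_windows seq lengths)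

-- ===== LEMMAS AND PROOFS =====

def pvGood (c : Char) : Bool := "ACDEFGHIKLMNPQRSTVWY".toList.contains c

-- prefix count (as Int) of non-canonical residues among the first j characters
def pvCnt (l : List Char) (j : Nat) : Int := ((l.take j).countP (fun c => !pvGood c) : Int)

def pvPre (l : List Char) : List Int := (List.range (l.length + 1)).map (fun j => pvCnt l j)

theorem pvStr_slice (s : String) (a b : Option Int) :
    PySem.Str.slice s a b = String.ofList (PySem.List.slice s.toList a b) := by
  calc PySem.Str.slice s a b = String.ofList (PySem.Str.slice s a b).toList := String.ofList_toList.symm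
    _ = _ := by rw [PySem.Str.toList_slice, PySem.Chars.slice_eq_listSlice]

theorem pvIsIn_singleton (a : Char) (s : String) : PySem.Str.isIn (String.singleton a) s = s.toList.contains a := by
  cases hc : s.toList.contains a with
  | true =>
    refine (PySem.Str.isIn_iff_infix _ _).mpr ?_
    have hm : a ∈ s.toList := by rw [← List.contains_iff_mem]; exact hc
    obtain ⟨u, v, huv⟩ := List.append_of_mem hm
    exact ⟨u, v, by simp [huv]⟩
  | false =>
    cases hx : PySem.Str.isIn (String.singleton a) s with
    | false => rfl
    | true =>
      exfalso
      have hm : a ∈ s.toList := ((PySem.Str.isIn_iff_infix _ _).mp hx).mem (by simp)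
      rw [← List.contains_iff_mem] at hm
      rw [hm] at hc
      simp at hc

theorem pvAny_eq (w : List Char) :
    (w.any fun aa => !(PySem.Str.isIn (String.singleton aa) "ACDEFGHIKLMNPQRSTVWY")) = w.any (fun c => !pvGood c) := by
  simp only [pvIsIn_singleton]
  rfl

theorem pvContains_canon (ch : Char) :
    PySem.Set.contains (PySem.Set.ofList "ACDEFGHIKLMNPQRSTVWY".toList) ch = pvGood ch := by
  rw [PySem.Set.ofList_eq_self_of_nodup _ (by decide), PySem.Set.contains_eq_listContains]
  rfl

-- pre[-1] on a list with a known last element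
theorem pvLast (p : List Int) (c : Int) : PySem.List.pyGetD (p ++ [c]) (-1) 0 = c := by
  unfold PySem.List.pyGetD PySem.List.pyGet? PySem.List.pyIdx?
  have h1 : ¬ ((0 : Int) ≤ -1) := by omega
  have h2 : -((p ++ [c]).length : Int) ≤ -1 := by
    simp only [List.length_append, List.length_cons, List.length_nil]
    omega
  simp only [h1, if_false, h2, if_true, Option.bind_some]
  have h3 : (p ++ [c]).length - ((-(-1 : Int)).toNat) = p.length := by simp
  rw [h3]
  simp

def pvBit (ch : Char) : Int := if !pvGood ch then 1 else 0

-- the prefix-building fold, generalized over the part already built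
theorem pvPre_fold (t : List Char) : ∀ (p : List Int) (c : Int),
    t.foldl (fun (pre : List Int) ch =>
      pre ++ [PySem.List.pyGetD pre (-1) 0 +
        (if !(PySem.Set.contains (PySem.Set.ofList "ACDEFGHIKLMNPQRSTVWY".toList) ch) then 1 else 0)]) (p ++ [c])
    = (p ++ [c]) ++ (List.range t.length).map (fun j => c + pvCnt t (j + 1)) := by
  induction t with
  | nil => intro p c; simp
  | cons ch t ih =>
    intro p c
    rw [List.foldl_cons]
    have e : (p ++ [c]) ++ [PySem.List.pyGetD (p ++ [c]) (-1) 0 +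
          (if !(PySem.Set.contains (PySem.Set.ofList "ACDEFGHIKLMNPQRSTVWY".toList) ch) then 1 else 0)]
        = (p ++ [c]) ++ [c + pvBit ch] := by
      rw [pvLast, pvContains_canon]
      rfl
    rw [e]
    rw [ih (p ++ [c]) (c + pvBit ch)]
    rw [List.length_cons, List.range_succ_eq_map, List.map_cons, List.map_map]
    rw [List.append_assoc]
    congr 1
    rw [List.singleton_append]
    congr 1
    · simp only [pvCnt, pvBit, zero_add, List.take_succ_cons, List.take_zero, List.countP_cons, List.countP_nil]
      cases pvGood ch <;> simp
    · apply List.map_congr_left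
      intro j _
      simp only [Function.comp_apply, pvCnt, pvBit, Nat.succ_eq_add_one, List.take_succ_cons, List.countP_cons]
      cases pvGood ch
      · simp
        ring
      · simp

theorem pvPre_eq (l : List Char) :
    l.foldl (fun (pre : List Int) ch =>
      pre ++ [PySem.List.pyGetD pre (-1) 0 +
        (if !(PySem.Set.contains (PySem.Set.ofList "ACDEFGHIKLMNPQRSTVWY".toList) ch) then 1 else 0)]) [0]
    = pvPre l := by
  have h := pvPre_fold l [] 0
  rw [List.nil_append] at h
  rw [h]
  unfold pvPre
  rw [List.range_succ_eq_map, List.map_cons, List.map_map]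
  rw [show ([(0 : Int)] : List Int) ++ (List.range l.length).map (fun j => 0 + pvCnt l (j + 1))
      = (0 : Int) :: (List.range l.length).map (fun j => 0 + pvCnt l (j + 1)) from List.singleton_append]
  congr 1
  apply List.map_congr_left
  intro j _
  simp [Nat.succ_eq_add_one]

theorem pvPre_get (l : List Char) (j : Nat) (hj : j ≤ l.length) :
    PySem.List.pyGetD (pvPre l) ((j : Nat) : Int) 0 = pvCnt l j := by
  rw [PySem.List.pyGetD_natCast]
  unfold pvPre
  rw [List.getD_eq_getElem?_getD, List.getElem?_map, List.getElem?_range (by omega)]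
  rfl

theorem pvPre_get' (l : List Char) (j : Int) (h0 : 0 ≤ j) (hj : j.toNat ≤ l.length) :
    PySem.List.pyGetD (pvPre l) j 0 = pvCnt l j.toNat := by
  rw [← Int.toNat_of_nonneg h0]
  exact pvPre_get l j.toNat hj

-- count of bad residues in a window, as a prefix difference
theorem pvCnt_window (l : List Char) (a b : Nat) (_hb : b ≤ l.length) (hab : a ≤ b) :
    ((((l.drop a).take (b - a)).countP (fun c => !pvGood c) : Int)) = pvCnt l b - pvCnt l a := by
  have hsplit : l.take b = l.take a ++ (l.drop a).take (b - a) := by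
    rw [← List.take_add (l := l) (i := a) (j := b - a)]
    congr 1
    omega
  unfold pvCnt
  rw [hsplit, List.countP_append]
  push_cast
  ring

-- pointwise equality of the two inner loop bodies, on the indices the loops reach
theorem pvStep_eq (seq : String) (k i : Int) (hk : 0 ≤ k) (hi : 0 ≤ i)
    (hik : i + k ≤ (seq.toList.length : Int)) (st : PySem.Set String × List String) :
    (let kmer := PySem.Str.slice seq (some i) (some (i + k))
     if PySem.Set.contains st.1 kmer then st
     else if kmer.toList.any (fun aa => !(PySem.Str.isIn (String.singleton aa) "ACDEFGHIKLMNPQRSTVWY")) then st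
     else (PySem.Set.add st.1 kmer, st.2 ++ [kmer]))
    = (if PySem.List.pyGetD (pvPre seq.toList) (i + k) 0 - PySem.List.pyGetD (pvPre seq.toList) i 0 ≠ 0 then st
       else
         let kmer := PySem.Str.slice seq (some i) (some (i + k))
         if !(PySem.Set.contains st.1 kmer) then (PySem.Set.add st.1 kmer, st.2 ++ [kmer])
         else st) := by
  have hik0 : 0 ≤ i + k := by omega
  have hbn : (i + k).toNat ≤ seq.toList.length := by omega
  have han : i.toNat ≤ seq.toList.length := by omega
  have habn : i.toNat ≤ (i + k).toNat := by omega
  -- the validity scan equals the prefix-difference test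
  have hval : ((PySem.Str.slice seq (some i) (some (i + k))).toList.any
        (fun aa => !(PySem.Str.isIn (String.singleton aa) "ACDEFGHIKLMNPQRSTVWY")))
      = decide (PySem.List.pyGetD (pvPre seq.toList) (i + k) 0 - PySem.List.pyGetD (pvPre seq.toList) i 0 ≠ 0) := by
    rw [pvAny_eq, pvStr_slice, String.toList_ofList]
    rw [PySem.List.slice_toNat (ha := hi) (hb := hik0)]
    rw [pvPre_get' _ _ hik0 hbn, pvPre_get' _ _ hi han]
    rw [← pvCnt_window seq.toList i.toNat (i + k).toNat hbn habn]
    set c := (((seq.toList.drop i.toNat).take ((i + k).toNat - i.toNat)).countP (fun ch => !pvGood ch)) with hc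
    cases hany : ((seq.toList.drop i.toNat).take ((i + k).toNat - i.toNat)).any (fun ch => !pvGood ch) with
    | true =>
      have hpos : 0 < c := by
        rw [hc, List.countP_pos_iff]
        obtain ⟨x, hx, hpx⟩ := List.any_eq_true.mp hany
        exact ⟨x, hx, hpx⟩
      rw [eq_comm, decide_eq_true_eq]
      omega
    | false =>
      have hc0 : c = 0 := by
        rw [hc, List.countP_eq_zero]
        intro x hx
        have := List.any_eq_false.mp hany x hx
        simp [this]
      simp [hc0]
  simp only []
  rw [hval]
  by_cases hcond : PySem.List.pyGetD (pvPre seq.toList) (i + k) 0 - PySem.List.pyGetD (pvPre seq.toList) i 0 ≠ 0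
  · rw [if_pos hcond, decide_eq_true hcond, if_pos rfl]
    cases hc : PySem.Set.contains st.1 (PySem.Str.slice seq (some i) (some (i + k))) <;> simp
  · rw [if_neg hcond, decide_eq_false hcond]
    cases hc : PySem.Set.contains st.1 (PySem.Str.slice seq (some i) (some (i + k))) <;> simp

theorem pvLen_eq (seq : String) : PySem.Str.len seq = (seq.toList.length : Int) := by
  simp [PySem.Str.len]

theorem pvMain (seq : String) (lengths : List Int) (hpre : ∀ k ∈ lengths, 0 ≤ k) :
    slide_windows seq lengths = slide_windows_alt seq lengths := by
  unfold slide_windows slide_windows_alt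
  simp only []
  rw [pvPre_eq seq.toList]
  refine congrArg Prod.snd (PySem.List.foldl_congr_mem _ _ _ _ ?_)
  intro acc k hkmem
  refine PySem.List.foldl_congr_mem _ _ _ acc ?_
  intro acc' i himem
  have hk : 0 ≤ k := hpre k hkmem
  have hi := (PySem.List.mem_pyRange_one).mp himem
  rw [pvLen_eq] at hi
  exact pvStep_eq seq k i hk hi.1 (by omega) acc'

-- ===== VERDICT (by name: the statement is the Claim_ definition above) =====
theorem slide_windows_spec : Claim_equal_slide_windows := by
  intro seq lengths _ hpre
  unfold Spec_slide_windows
  exact pvMain seq lengths hpre
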